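-- pv_equiv track=rewrite | github.com/pypi-data/pypi-mirror-354 | packages/batchfactory/batchfactory-0.2.0.tar.gz/batchfactory-0.2.0/tests/example4_long_text_segmentation.py | segment_text_by_starts
-- ===== SOURCE A (Python) =====
-- def get_nonempty_lines(text):
--     return [line for line in text.split('\n') if line.strip()]
--
-- def segment_text_by_starts(text, starts):
--     lines = get_nonempty_lines(text)
--     grouped_lines = [""]
--     for i, line in enumerate(lines):
--         if i in starts:
--             if grouped_lines[-1]:
--                 grouped_lines.append("")
--         grouped_lines[-1] += line + "\n\n"
--     return grouped_lines
-- ===== SOURCE B (Python) =====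
-- def get_nonempty_lines(text):
--     return [line for line in text.split('\n') if line.strip()]
--
-- def segment_text_by_starts(text, starts):
--     lines = get_nonempty_lines(text)
--     n = len(lines)
--     breaks = [i for i in range(1, n) if i in starts]
--     result = []
--     prev = 0
--     for b in breaks + [n]:
--         result.append(''.join(line + '\n\n' for line in lines[prev:b]))
--         prev = b
--     return result
-- ===== Notes on version B (the rewrite author's own statement) =====
-- stated objective: alternative
-- what changed: B precomputes the break indices and builds each segment by slicing the line list and joining the slice, instead of A's single stateful loop that grows the last group in place (using that a group is empty exactly before its first line).
import Mathlib
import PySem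

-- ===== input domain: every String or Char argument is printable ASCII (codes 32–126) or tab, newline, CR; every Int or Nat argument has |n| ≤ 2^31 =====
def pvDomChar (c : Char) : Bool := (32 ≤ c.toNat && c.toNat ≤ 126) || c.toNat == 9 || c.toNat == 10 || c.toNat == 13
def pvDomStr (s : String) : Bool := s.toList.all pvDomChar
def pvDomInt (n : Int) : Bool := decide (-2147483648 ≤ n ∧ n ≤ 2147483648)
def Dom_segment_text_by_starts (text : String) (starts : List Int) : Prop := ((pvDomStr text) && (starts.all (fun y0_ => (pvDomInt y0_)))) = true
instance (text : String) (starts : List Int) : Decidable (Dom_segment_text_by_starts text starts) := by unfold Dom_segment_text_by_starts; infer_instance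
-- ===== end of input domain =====

-- B groups the nonempty lines by slicing at precomputed break indices instead of growing the
-- last group inside one stateful loop; same value on every input (alternative decomposition, not faster).

-- ===== PORT A =====
-- shared module helper get_nonempty_lines; split? is exact here: the separator "\n" is a nonempty literal
def get_nonempty_lines (text : String) : List String :=
  ((PySem.Str.split? text "\n").getD []).filter (fun line => PySem.Str.strip line ≠ "")

def segment_text_by_starts (text : String) (starts : List Int) : List String :=
  let lines := get_nonempty_lines text
  (PySem.List.enumerate lines).foldl (fun grouped_lines p =>
    let grouped_lines :=
      if p.1 ∈ starts ∧ grouped_lines.getLastD "" ≠ "" then grouped_lines ++ [""] else grouped_lines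
    grouped_lines.dropLast ++ [grouped_lines.getLastD "" ++ p.2 ++ "\n\n"]) [""]

-- ===== PORT B =====
def segment_text_by_starts_alt (text : String) (starts : List Int) : List String :=
  let lines := get_nonempty_lines text
  let n : Int := lines.length
  let breaks := (PySem.List.pyRange 1 n).filter (fun i => i ∈ starts)
  ((breaks ++ [n]).foldl (fun st b =>
      (st.1 ++ [PySem.Str.join "" ((PySem.List.slice lines (some st.2) (some b)).map (fun line => line ++ "\n\n"))], b))
    (([] : List String), (0 : Int))).1

-- ===== PRECONDITION & SPEC =====
def Spec_segment_text_by_starts (text : String) (starts : List Int) (out : List String) : Prop := out = segment_text_by_starts_alt text starts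
instance (text : String) (starts : List Int) (out : List String) : Decidable (Spec_segment_text_by_starts text starts out) := by unfold Spec_segment_text_by_starts; infer_instance

-- ===== CLAIM (what is proved, stated in full; the proofs are below) =====
def Claim_equal_segment_text_by_starts : Prop := ∀ (text : String) (starts : List Int), Dom_segment_text_by_starts text starts → Spec_segment_text_by_starts text starts (segment_text_by_starts text starts)

-- ===== LEMMAS AND PROOFS =====

-- A's loop, with the group list split as acc ++ [current group]
def fA (starts : List Int) : Int → String → List String → List String
  | _, cur, [] => [cur]
  | i, cur, l :: ls =>
    if i ∈ starts ∧ cur ≠ "" then cur :: fA starts (i + 1) (l ++ "\n\n") ls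
    else fA starts (i + 1) (cur ++ l ++ "\n\n") ls

-- render one chunk of lines the way B's join does
def render (chunk : List String) : String :=
  PySem.Str.join "" (chunk.map (fun line => line ++ "\n\n"))

-- B's loop over the break list
def gB (lines : List String) : Int → List Int → List String
  | prev, [] => [render (PySem.List.slice lines (some prev) (some (lines.length : Int)))]
  | prev, b :: bs => render (PySem.List.slice lines (some prev) (some b)) :: gB lines b bs

def mapHead (f : String → String) : List String → List String
  | [] => []
  | h :: t => f h :: t

theorem append_nn_ne_empty (s : String) : s ++ "\n\n" ≠ "" := by
  intro h; have := congrArg String.toList h; simp at this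

theorem render_nil : render [] = "" := by
  apply String.toList_inj.mp
  simp [render, PySem.Str.toList_join, PySem.Chars.join_nil]

theorem render_cons (l : String) (ch : List String) :
    render (l :: ch) = (l ++ "\n\n") ++ render ch := by
  apply String.toList_inj.mp
  cases ch with
  | nil => simp [render, PySem.Str.toList_join, PySem.Chars.join_nil]
  | cons m t => simp [render, PySem.Str.toList_join, PySem.Chars.join_cons_cons]

theorem slice_self (lines : List String) (j : Nat) (b : Int) (hb : b ≤ (j : Int)) (h0 : 0 ≤ b) :
    PySem.List.slice lines (some (j : Int)) (some b) = [] := by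
  rw [PySem.List.slice_toNat _ (by omega) h0]
  have : b.toNat - j = 0 := by omega
  simp [this]

theorem slice_cons (lines : List String) (j : Nat) (b : Int) (hj : j < lines.length)
    (hb : (j : Int) < b) :
    PySem.List.slice lines (some (j : Int)) (some b) =
      lines.getD j "" :: PySem.List.slice lines (some ((j : Int) + 1)) (some b) := by
  have h1 : ((j : Int) + 1) = ((j + 1 : Nat) : Int) := by push_cast; ring
  rw [h1, PySem.List.slice_toNat _ (by omega) (by omega),
      PySem.List.slice_toNat _ (by omega) (by omega)]
  simp only [Int.toNat_natCast]
  rw [List.drop_eq_getElem_cons hj]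
  have h2 : b.toNat - j = (b.toNat - (j + 1)) + 1 := by omega
  rw [h2, List.take_succ_cons, List.getD_eq_getElem _ _ hj]

theorem slice_nil_of_le (lines : List String) (p b : Int) (hp : (lines.length : Int) ≤ p)
    (h0 : 0 ≤ p) (hb : 0 ≤ b) :
    PySem.List.slice lines (some p) (some b) = [] := by
  rw [PySem.List.slice_toNat _ h0 hb]
  rw [List.drop_eq_nil_of_le (by omega)]
  simp

-- the break indices of B, starting at j
def Bs (starts : List Int) (lines : List String) (j : Nat) : List Int :=
  (PySem.List.pyRange (j : Int) (lines.length : Int)).filter (fun i => i ∈ starts)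

theorem Bs_nil (starts : List Int) (lines : List String) (j : Nat) (h : lines.length ≤ j) :
    Bs starts lines j = [] := by
  have hc : (lines.length : Int) ≤ (j : Int) := by exact_mod_cast h
  unfold Bs
  rw [PySem.List.pyRange_one_eq_nil hc]
  rfl

theorem Bs_cons (starts : List Int) (lines : List String) (j : Nat) (h : j < lines.length) :
    Bs starts lines j =
      (if (j : Int) ∈ starts then [(j : Int)] else []) ++ Bs starts lines (j + 1) := by
  unfold Bs
  rw [PySem.List.pyRange_one_cons (by exact_mod_cast h)]
  have h1 : ((j : Int) + 1) = ((j + 1 : Nat) : Int) := by push_cast; ring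
  rw [h1]
  by_cases hm : (j : Int) ∈ starts <;> simp [hm]

theorem mem_Bs (starts : List Int) (lines : List String) (j : Nat) {b : Int}
    (h : b ∈ Bs starts lines j) : (j : Int) ≤ b ∧ b < (lines.length : Int) := by
  have := List.mem_filter.mp h
  exact PySem.List.mem_pyRange_one.mp this.1

-- shifting the start of the first chunk by one prepends that line's rendering to the first group
theorem gB_shift (lines : List String) (j : Nat) (bs : List Int)
    (hj : j < lines.length) (hbs : ∀ b ∈ bs, (j : Int) < b ∧ b ≤ (lines.length : Int)) :
    gB lines (j : Int) bs =
      mapHead ((lines.getD j "" ++ "\n\n") ++ ·) (gB lines ((j : Int) + 1) bs) := by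
  cases bs with
  | nil =>
      simp only [gB, mapHead]
      rw [slice_cons lines j _ hj (by exact_mod_cast hj), render_cons]
  | cons b t =>
      have hb := hbs b (List.mem_cons_self ..)
      simp only [gB, mapHead]
      rw [slice_cons lines j b hj hb.1, render_cons]

theorem hmem_Bs (starts : List Int) (lines : List String) (j : Nat) :
    ∀ b ∈ Bs starts lines (j + 1), (j : Int) < b ∧ b ≤ (lines.length : Int) := by
  intro b hb
  have h := mem_Bs starts lines (j + 1) hb
  have h1 : ((j + 1 : Nat) : Int) = (j : Int) + 1 := by push_cast; ring
  rw [h1] at h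
  omega

-- main invariant: A's remaining loop equals B's remaining chunks, with the pending group prefixed
theorem main_inv (starts : List Int) (lines : List String) :
    ∀ (k j : Nat) (cur : String), lines.length - j = k → cur ≠ "" →
      fA starts (j : Int) cur (lines.drop j) =
        mapHead (cur ++ ·) (gB lines (j : Int) (Bs starts lines j)) := by
  intro k
  induction k with
  | zero =>
      intro j cur hk hcur
      have hj : lines.length ≤ j := by omega
      rw [List.drop_eq_nil_of_le hj, Bs_nil starts lines j hj]
      simp only [fA, gB, mapHead]
      rw [slice_nil_of_le lines _ _ (by exact_mod_cast hj) (by omega) (by omega), render_nil,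
        String.append_empty]
  | succ k ih =>
      intro j cur hk hcur
      have hj : j < lines.length := by omega
      have h1 : ((j : Int) + 1) = ((j + 1 : Nat) : Int) := by push_cast; ring
      have step : ∀ cur' : String, cur' ≠ "" →
          fA starts ((j : Int) + 1) cur' (lines.drop (j + 1)) =
            mapHead (cur' ++ ·) (gB lines ((j : Int) + 1) (Bs starts lines (j + 1))) := by
        intro cur' hcur'
        rw [h1]; exact ih (j + 1) cur' (by omega) hcur'
      rw [List.drop_eq_getElem_cons hj, Bs_cons starts lines j hj]
      by_cases hm : (j : Int) ∈ starts
      · rw [if_pos hm, List.singleton_append]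
        simp only [fA]
        rw [if_pos ⟨hm, hcur⟩]
        simp only [gB, mapHead]
        rw [slice_self lines j _ le_rfl (by omega), render_nil, String.append_empty]
        rw [step _ (append_nn_ne_empty _)]
        rw [gB_shift lines j _ hj (hmem_Bs starts lines j)]
        rw [List.getD_eq_getElem _ _ hj]
      · rw [if_neg hm, List.nil_append]
        simp only [fA]
        rw [if_neg (fun h => hm h.1)]
        rw [step _ (append_nn_ne_empty _)]
        rw [gB_shift lines j _ hj (hmem_Bs starts lines j)]
        rw [List.getD_eq_getElem _ _ hj]
        cases gB lines ((j : Int) + 1) (Bs starts lines (j + 1)) with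
        | nil => simp [mapHead]
        | cons h t =>
            simp only [mapHead, List.cons.injEq, and_true]
            simp [String.append_assoc]

-- A's foldl over the enumerated lines, with the group list written as acc ++ [cur]
theorem bridgeA (starts : List Int) :
    ∀ (ls : List String) (i : Int) (acc : List String) (cur : String),
      (PySem.List.enumerate ls i).foldl (fun grouped_lines p =>
        let grouped_lines :=
          if p.1 ∈ starts ∧ grouped_lines.getLastD "" ≠ "" then grouped_lines ++ [""] else grouped_lines
        grouped_lines.dropLast ++ [grouped_lines.getLastD "" ++ p.2 ++ "\n\n"]) (acc ++ [cur])
        = acc ++ fA starts i cur ls := by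
  intro ls
  induction ls with
  | nil => intro i acc cur; simp [PySem.List.enumerate, fA]
  | cons l t ih =>
      intro i acc cur
      rw [PySem.List.enumerate_cons, List.foldl_cons]
      simp only [List.getLastD_concat]
      split_ifs with hc
      · rw [List.dropLast_concat, List.getLastD_concat, ih]
        simp only [fA]
        rw [if_pos hc, String.empty_append]
        simp
      · rw [List.dropLast_concat, List.getLastD_concat, ih]
        simp only [fA]
        rw [if_neg hc]

-- B's foldl over breaks ++ [n]
theorem bridgeB (lines : List String) :
    ∀ (bs : List Int) (res : List String) (prev : Int),
      ((bs ++ [(lines.length : Int)]).foldl (fun st b =>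
        (st.1 ++ [PySem.Str.join "" ((PySem.List.slice lines (some st.2) (some b)).map
          (fun line => line ++ "\n\n"))], b)) (res, prev)).1
        = res ++ gB lines prev bs := by
  intro bs
  induction bs with
  | nil => intro res prev; simp [gB, render]
  | cons b t ih =>
      intro res prev
      rw [List.cons_append, List.foldl_cons, ih]
      simp [gB, render]

theorem core_eq (starts : List Int) (lines : List String) :
    (PySem.List.enumerate lines).foldl (fun grouped_lines p =>
        let grouped_lines :=
          if p.1 ∈ starts ∧ grouped_lines.getLastD "" ≠ "" then grouped_lines ++ [""] else grouped_lines
        grouped_lines.dropLast ++ [grouped_lines.getLastD "" ++ p.2 ++ "\n\n"]) [""]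
      = gB lines 0 (Bs starts lines 1) := by
  have hA := bridgeA starts lines 0 [] ""
  simp only [List.nil_append] at hA
  rw [hA]
  cases lines with
  | nil =>
      rw [Bs_nil starts [] 1 (by simp)]
      simp only [fA, gB]
      rw [slice_nil_of_le [] 0 _ (by simp) (by omega) (by simp), render_nil]
  | cons l t =>
      simp only [fA]
      rw [if_neg (by simp), String.empty_append]
      have hm2 := main_inv starts (l :: t) ((l :: t).length - 1) 1 (l ++ "\n\n") rfl
        (append_nn_ne_empty l)
      simp only [List.drop_succ_cons, List.drop_zero, Nat.cast_one] at hm2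
      rw [show ((0 : Int) + 1) = (1 : Int) from by norm_num, hm2]
      have hs := gB_shift (l :: t) 0 (Bs starts (l :: t) 1) (by simp)
        (hmem_Bs starts (l :: t) 0)
      simp only [Nat.cast_zero, zero_add, List.getD_cons_zero] at hs
      rw [hs]

-- ===== VERDICT (by name: the statement is the Claim_ definition above) =====
theorem segment_text_by_starts_spec : Claim_equal_segment_text_by_starts := by
  intro text starts _
  show segment_text_by_starts text starts = segment_text_by_starts_alt text starts
  unfold segment_text_by_starts segment_text_by_starts_alt
  rw [core_eq starts (get_nonempty_lines text),
    bridgeB (get_nonempty_lines text) _ [] 0]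
  simp [Bs]
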